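-- pv_equiv track=rewrite | github.com/kdh10086/Agent-Bridge-Module | agent_bridge/gui/report_roundtrip.py | _extract_body_only_codex_next_prompt
-- ===== SOURCE A (Python) =====
-- def _extract_body_only_codex_next_prompt(text: str) -> str | None:
--     if "```" in text or "~~~" in text:
--         return None
--     lines = text.splitlines(keepends=True)
--     label_indexes = [
--         index for index, line in enumerate(lines) if line.strip() == "CODEX_NEXT_PROMPT"
--     ]
--     if len(label_indexes) != 1:
--         return None
--     label_index = label_indexes[0]
--     if any(line.strip() for line in lines[:label_index]):
--         return None
--     return "".join(lines[label_index + 1 :])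
-- ===== SOURCE B (Python) =====
-- def _extract_body_only_codex_next_prompt(text: str) -> str | None:
--     if "```" in text or "~~~" in text:
--         return None
--     body = None          # lines collected after the (first) label; None until a label is seen
--     label_count = 0
--     blocked = False      # a non-blank line occurred before the first label
--     for line in text.splitlines(keepends=True):
--         if line.strip() == "CODEX_NEXT_PROMPT":
--             label_count += 1
--             if body is None:
--                 body = []
--         elif body is None:
--             if line.strip():
--                 blocked = True
--         else:
--             body.append(line)
--     if label_count != 1 or blocked:
--         return None
--     return "".join(body)
-- ===== Notes on version B (the rewrite author's own statement) =====
-- stated objective: alternative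
-- what changed: A's three separate passes over the lines (index comprehension, length check, any() over the prefix slice) are merged into one fold that maintains the collected body, the label count and a blocked flag.
import Mathlib
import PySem

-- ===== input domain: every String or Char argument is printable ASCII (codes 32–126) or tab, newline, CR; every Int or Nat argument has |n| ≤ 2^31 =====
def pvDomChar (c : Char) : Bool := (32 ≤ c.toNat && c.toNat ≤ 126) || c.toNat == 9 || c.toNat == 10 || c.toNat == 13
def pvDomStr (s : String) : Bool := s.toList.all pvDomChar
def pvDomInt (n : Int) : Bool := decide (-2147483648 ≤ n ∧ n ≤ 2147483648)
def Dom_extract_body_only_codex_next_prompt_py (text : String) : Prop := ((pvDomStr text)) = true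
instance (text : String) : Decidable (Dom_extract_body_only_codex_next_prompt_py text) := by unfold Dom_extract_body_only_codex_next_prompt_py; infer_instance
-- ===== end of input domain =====

-- B replaces A's three separate passes over the lines (index comprehension, length check,
-- any() over the prefix) by one fold maintaining (body lines, label count, blocked flag);
-- objective: alternative one-pass decomposition, same cost.

-- Hand port of str.splitlines(keepends=True) over List Char (PySem has no keepends variant).
-- Exact on the stated ASCII domain, where the only line boundaries are \n, \r\n, \r.
def pySplitKeepGo : List Char → List Char → List (List Char)
  | [], acc => if acc.isEmpty then [] else [acc.reverse]
  | '\r' :: '\n' :: rest, acc => (acc.reverse ++ ['\r', '\n']) :: pySplitKeepGo rest []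
  | '\n' :: rest, acc => (acc.reverse ++ ['\n']) :: pySplitKeepGo rest []
  | '\r' :: rest, acc => (acc.reverse ++ ['\r']) :: pySplitKeepGo rest []
  | c :: rest, acc => pySplitKeepGo rest (c :: acc)

def pySplitKeep (cs : List Char) : List (List Char) := pySplitKeepGo cs []

-- shared literal tests from both Pythons: line.strip() == "CODEX_NEXT_PROMPT", bool(line.strip())
def pvLabelP (line : List Char) : Bool := PySem.Chars.strip line == "CODEX_NEXT_PROMPT".toList
def pvNonblank (line : List Char) : Bool := decide (PySem.Chars.strip line ≠ [])

-- ===== PORT A =====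
def extract_body_only_codex_next_prompt_py (text : String) : Option String :=
  if PySem.Str.isIn "```" text || PySem.Str.isIn "~~~" text then none
  else
    let lines := pySplitKeep text.toList
    let label_indexes := ((PySem.List.enumerate lines).filter (fun p => pvLabelP p.2)).map (·.1)
    if label_indexes.length != 1 then none
    else
      let label_index := label_indexes.headD 0   -- label_indexes[0]; the list has length 1 here
      if (PySem.List.slice lines none (some label_index)).any pvNonblank then none
      else some (String.ofList (PySem.Chars.join [] (PySem.List.slice lines (some (label_index + 1)) none)))

-- ===== PORT B =====
-- one step of B's single pass: state = (body lines after first label, label count, blocked flag)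
def pvBStep (st : Option (List (List Char)) × Nat × Bool) (line : List Char) :
    Option (List (List Char)) × Nat × Bool :=
  let (body, cnt, blocked) := st
  if pvLabelP line then (some (body.getD []), cnt + 1, blocked)
  else
    match body with
    | none => (none, cnt, blocked || pvNonblank line)
    | some b => (some (b ++ [line]), cnt, blocked)

def extract_body_only_codex_next_prompt_py_alt (text : String) : Option String :=
  if PySem.Str.isIn "```" text || PySem.Str.isIn "~~~" text then none
  else
    let st := (pySplitKeep text.toList).foldl pvBStep (none, 0, false)
    if st.2.1 != 1 || st.2.2 then none
    else some (String.ofList (PySem.Chars.join [] (st.1.getD [])))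

-- ===== PRECONDITION & SPEC =====
def Spec_extract_body_only_codex_next_prompt_py (text : String) (out : Option String) : Prop := out = extract_body_only_codex_next_prompt_py_alt text
instance (text : String) (out : Option String) : Decidable (Spec_extract_body_only_codex_next_prompt_py text out) := by unfold Spec_extract_body_only_codex_next_prompt_py; infer_instance

-- ===== CLAIM (what is proved, stated in full; the proofs are below) =====
def Claim_equal_extract_body_only_codex_next_prompt_py : Prop := ∀ (text : String), Dom_extract_body_only_codex_next_prompt_py text → Spec_extract_body_only_codex_next_prompt_py text (extract_body_only_codex_next_prompt_py text)

-- ===== LEMMAS AND PROOFS =====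

theorem pvFilterEnum_nolabel (l : List (List Char)) (h : ∀ x ∈ l, pvLabelP x = false)
    (s : Int) : (PySem.List.enumerate l s).filter (fun p => pvLabelP p.2) = [] := by
  induction l generalizing s with
  | nil => simp [PySem.List.enumerate_nil]
  | cons x xs ih =>
    simp [PySem.List.enumerate_cons, h x (by simp), ih (fun y hy => h y (by simp [hy]))]

theorem pvFilterEnum_len (l : List (List Char)) (s : Int) :
    (((PySem.List.enumerate l s).filter (fun p => pvLabelP p.2)).map (·.1)).length
      = l.countP pvLabelP := by
  induction l generalizing s with
  | nil => simp [PySem.List.enumerate_nil]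
  | cons x xs ih =>
    by_cases hx : pvLabelP x = true <;>
      simp [PySem.List.enumerate_cons, hx, ih (s + 1)]

theorem pvFold_count (l : List (List Char)) (st : Option (List (List Char)) × Nat × Bool) :
    (l.foldl pvBStep st).2.1 = st.2.1 + l.countP pvLabelP := by
  induction l generalizing st with
  | nil => simp
  | cons x xs ih =>
    obtain ⟨body, cnt, blk⟩ := st
    by_cases hx : pvLabelP x = true
    · simp [List.foldl_cons, pvBStep, hx, ih]
      omega
    · rw [Bool.not_eq_true] at hx
      cases body <;> simp [List.foldl_cons, pvBStep, hx, ih]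

theorem pvFold_none (l : List (List Char)) (h : ∀ x ∈ l, pvLabelP x = false)
    (cnt : Nat) (b : Bool) :
    l.foldl pvBStep (none, cnt, b) = (none, cnt, b || l.any pvNonblank) := by
  induction l generalizing b with
  | nil => simp
  | cons x xs ih =>
    rw [List.foldl_cons]
    simp only [pvBStep, h x (by simp), Bool.false_eq_true, if_false]
    rw [ih (fun y hy => h y (by simp [hy]))]
    simp [Bool.or_assoc]

theorem pvFold_some (l : List (List Char)) (h : ∀ x ∈ l, pvLabelP x = false)
    (bd : List (List Char)) (cnt : Nat) (b : Bool) :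
    l.foldl pvBStep (some bd, cnt, b) = (some (bd ++ l), cnt, b) := by
  induction l generalizing bd with
  | nil => simp
  | cons x xs ih =>
    rw [List.foldl_cons]
    simp only [pvBStep, h x (by simp), Bool.false_eq_true, if_false]
    rw [ih (fun y hy => h y (by simp [hy]))]
    simp

theorem pvCount_one_split (l : List (List Char)) (h : l.countP pvLabelP = 1) :
    ∃ pre x post, l = pre ++ x :: post ∧ (∀ y ∈ pre, pvLabelP y = false) ∧
      pvLabelP x = true ∧ (∀ y ∈ post, pvLabelP y = false) := by
  induction l with
  | nil => simp at h
  | cons x xs ih =>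
    rw [List.countP_cons] at h
    by_cases hx : pvLabelP x = true
    · refine ⟨[], x, xs, by simp, by simp, hx, ?_⟩
      have hxs : xs.countP pvLabelP = 0 := by rw [hx] at h; simpa using h
      exact fun y hy => by simpa using List.countP_eq_zero.mp hxs y hy
    · simp [hx] at h
      obtain ⟨pre, z, post, rfl, hpre, hz, hpost⟩ := ih h
      refine ⟨x :: pre, z, post, by simp, fun y hy => ?_, hz, hpost⟩
      rcases List.mem_cons.mp hy with rfl | hy
      · simpa using hx
      · exact hpre y hy

-- ===== VERDICT (by name: the statement is the Claim_ definition above) =====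
theorem extract_body_only_codex_next_prompt_py_spec : Claim_equal_extract_body_only_codex_next_prompt_py := by
  intro text _
  unfold Spec_extract_body_only_codex_next_prompt_py
  unfold extract_body_only_codex_next_prompt_py extract_body_only_codex_next_prompt_py_alt
  by_cases hf : (PySem.Str.isIn "```" text || PySem.Str.isIn "~~~" text) = true
  · rw [if_pos hf, if_pos hf]
  · rw [if_neg hf, if_neg hf]
    set lines := pySplitKeep text.toList with hlines
    by_cases hc : lines.countP pvLabelP = 1
    · obtain ⟨pre, x, post, hdec, hpre, hx, hpost⟩ := pvCount_one_split lines hc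
      have hidx : ((PySem.List.enumerate lines 0).filter (fun p => pvLabelP p.2)).map (·.1)
          = [(pre.length : Int)] := by
        rw [hdec, PySem.List.enumerate_append, PySem.List.enumerate_cons,
          List.filter_append, pvFilterEnum_nolabel pre hpre, List.filter_cons]
        simp [hx, pvFilterEnum_nolabel post hpost]
      have hfold : lines.foldl pvBStep (none, 0, false)
          = (some post, 1, pre.any pvNonblank) := by
        rw [hdec, List.foldl_append, pvFold_none pre hpre, List.foldl_cons]
        simp only [pvBStep, hx, if_true, Option.getD_none]
        rw [pvFold_some post hpost]
        simp
      simp only [hidx, hfold, List.length_cons, List.length_nil, List.headD_cons]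
      have htake : PySem.List.slice lines none (some (pre.length : Int)) = pre := by
        rw [PySem.List.slice_to_natCast, hdec, List.take_left]
      have hdrop : PySem.List.slice lines (some ((pre.length : Int) + 1)) none = post := by
        have h1 : ((pre.length : Int) + 1) = ((pre.length + 1 : Nat) : Int) := by push_cast; ring
        rw [h1, PySem.List.slice_from_natCast, hdec,
          show pre ++ x :: post = (pre ++ [x]) ++ post by simp,
          show pre.length + 1 = (pre ++ [x]).length by simp, List.drop_left]
      rw [htake, hdrop]
      by_cases hb : pre.any pvNonblank = true
      · simp [hb]
      · rw [Bool.not_eq_true] at hb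
        simp [hb]
    · have hA : ((((PySem.List.enumerate lines 0).filter (fun p => pvLabelP p.2)).map (·.1)).length != 1) = true := by
        rw [pvFilterEnum_len]; simpa [bne_iff_ne] using hc
      have hB : (((lines.foldl pvBStep (none, 0, false)).2.1 != 1)
          || (lines.foldl pvBStep (none, 0, false)).2.2) = true := by
        rw [Bool.or_eq_true]; left
        rw [bne_iff_ne, pvFold_count]; simpa using hc
      simp only [hA, hB, if_true]
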